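-- pv_equiv track=rewrite | github.com/pintotomas10/PL2025-A104448 | TPC1/tpc1.py | somador
-- ===== SOURCE A (Python) =====
-- def somador(imput):
--     on = True
--     somatorio = 0
--     resultado = []
--
--     a = 0
--     while a < len(imput):  # utilização da função lower() para colocar as letras todas minusculas
--         if imput[a:a+2].lower() == "on":
--             on = True # como encontrou o on, o on fica True
--             a += 2
--         elif imput[a:a+3].lower() == "off":
--             on = False # como encontrou o off, o on fica False
--             a += 3
--         elif imput[a] == "=":
--             resultado.append(somatorio) # como encontra o =, então o valor do somatorio é adicionado ao fim da lista
--             a += 1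
--         elif imput[a].isdigit() and on:
--             start = a
--             while a < len(imput) and imput[a].isdigit():
--                 a += 1
--             somatorio += int(imput[start:a])
--         else:
--             a += 1
--     return resultado
-- ===== SOURCE B (Python) =====
-- import re
--
-- _TOKEN = re.compile(r'on|off|=|[0-9]+|.', re.IGNORECASE | re.DOTALL)
--
-- def somador(imput):
--     on = True
--     somatorio = 0
--     resultado = []
--     for m in _TOKEN.finditer(imput):
--         tok = m.group().lower()
--         if tok == "on":
--             on = True
--         elif tok == "off":
--             on = False
--         elif tok == "=":
--             resultado.append(somatorio)
--         elif tok.isdigit() and on: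
--             somatorio += int(tok)
--     return resultado
-- ===== Notes on version B (the rewrite author's own statement) =====
-- stated objective: idiomatic
-- what changed: Replaced A's manual index arithmetic with slice lookahead and a nested digit while-loop by a single regex tokenization (re.finditer over 'on|off|=|[0-9]+|.', IGNORECASE|DOTALL) followed by one fold over the token stream.
import Mathlib
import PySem

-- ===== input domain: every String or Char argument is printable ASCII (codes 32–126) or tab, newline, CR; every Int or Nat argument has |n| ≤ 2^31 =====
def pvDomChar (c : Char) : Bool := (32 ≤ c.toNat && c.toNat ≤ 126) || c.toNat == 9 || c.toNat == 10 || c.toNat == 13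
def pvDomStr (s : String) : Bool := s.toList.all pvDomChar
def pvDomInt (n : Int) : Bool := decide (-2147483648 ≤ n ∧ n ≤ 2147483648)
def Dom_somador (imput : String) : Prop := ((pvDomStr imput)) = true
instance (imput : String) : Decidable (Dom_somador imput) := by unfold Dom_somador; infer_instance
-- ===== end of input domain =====

-- B replaces A's manual index/slice-lookahead scan with a one-pass regex tokenizer
-- (r'on|off|=|[0-9]+|.', IGNORECASE|DOTALL) followed by a fold over the token stream (objective: idiomatic).

-- int() applied to a digit run; both Pythons call int on a nonempty all-digit slice,
-- where PySem.Int.ofChars? always returns some (the .getD 0 default is never reached).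
def pyInt (cs : List Char) : Int := (PySem.Int.ofChars? cs).getD 0

-- ===== PORT A =====
-- A's while loop over index a, re-expressed as structural recursion on the suffix imput[a:];
-- slices imput[a:a+2], imput[a:a+3] are take 2 / take 3 of the suffix, the inner digit
-- while-loop is takeWhile/dropWhile of the suffix (same characters, same order).
def somadorGo : List Char → Bool → Int → List Int → List Int
  | [], _, _, res => res
  | c :: tl, on_, som, res =>
    if PySem.Chars.lower ((c :: tl).take 2) = ['o', 'n'] then
      somadorGo ((c :: tl).drop 2) true som res
    else if PySem.Chars.lower ((c :: tl).take 3) = ['o', 'f', 'f'] then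
      somadorGo ((c :: tl).drop 3) false som res
    else if c = '=' then
      somadorGo tl on_ som (res ++ [som])
    else if PySem.Chars.isdigit c && on_ then
      somadorGo ((c :: tl).dropWhile PySem.Chars.isdigit) on_
        (som + pyInt ((c :: tl).takeWhile PySem.Chars.isdigit)) res
    else
      somadorGo tl on_ som res
termination_by cs => cs.length
decreasing_by
  all_goals have := List.length_dropWhile_le PySem.Chars.isdigit tl
  all_goals (simp_all; try omega)

def somador (imput : String) : List Int :=
  somadorGo imput.toList true 0 []

-- ===== PORT B =====
-- Hand port of re.finditer(r'on|off|=|[0-9]+|.', re.IGNORECASE | re.DOTALL): leftmost scan,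
-- first alternative wins, '.' (DOTALL) consumes any single character. Exact for this pattern
-- on the admitted inputs (PySem has no regex primitive).
def somadorTokens : List Char → List (List Char)
  | [] => []
  | c :: tl =>
    if PySem.Chars.lower ((c :: tl).take 2) = ['o', 'n'] then
      (c :: tl).take 2 :: somadorTokens ((c :: tl).drop 2)
    else if PySem.Chars.lower ((c :: tl).take 3) = ['o', 'f', 'f'] then
      (c :: tl).take 3 :: somadorTokens ((c :: tl).drop 3)
    else if c = '=' then
      ['='] :: somadorTokens tl
    else if PySem.Chars.isdigit c then
      (c :: tl).takeWhile PySem.Chars.isdigit :: somadorTokens ((c :: tl).dropWhile PySem.Chars.isdigit)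
    else
      [c] :: somadorTokens tl
termination_by cs => cs.length
decreasing_by
  all_goals have := List.length_dropWhile_le PySem.Chars.isdigit tl
  all_goals (simp_all; try omega)

-- the loop body of B: state (on, somatorio, resultado), one token at a time
def somadorStep (st : Bool × Int × List Int) (tokRaw : List Char) : Bool × Int × List Int :=
  let tok := PySem.Chars.lower tokRaw
  if tok = ['o', 'n'] then (true, st.2.1, st.2.2)
  else if tok = ['o', 'f', 'f'] then (false, st.2.1, st.2.2)
  else if tok = ['='] then (st.1, st.2.1, st.2.2 ++ [st.2.1])
  else if PySem.Chars.strIsdigit tok && st.1 then (st.1, st.2.1 + pyInt tok, st.2.2)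
  else st

def somador_alt (imput : String) : List Int :=
  ((somadorTokens imput.toList).foldl somadorStep (true, 0, [])).2.2

-- ===== PRECONDITION & SPEC =====
def Spec_somador (imput : String) (out : List Int) : Prop := out = somador_alt imput
instance (imput : String) (out : List Int) : Decidable (Spec_somador imput out) := by unfold Spec_somador; infer_instance

-- ===== CLAIM (what is proved, stated in full; the proofs are below) =====
def Claim_equal_somador : Prop := ∀ (imput : String), Dom_somador imput → Spec_somador imput (somador imput)

-- ===== LEMMAS AND PROOFS =====

theorem isdigit_iff_toNat (c : Char) : PySem.Chars.isdigit c = true ↔ 48 ≤ c.toNat ∧ c.toNat ≤ 57 := by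
  simp only [PySem.Chars.isdigit, Char.le_def, Bool.and_eq_true, decide_eq_true_eq,
    UInt32.le_iff_toNat_le]
  constructor <;> (intro h; constructor <;> simp_all)

theorem char_eq_iff_toNat (c d : Char) : c = d ↔ c.toNat = d.toNat := by
  constructor
  · intro h; rw [h]
  · intro h; exact Char.ext (UInt32.toNat_inj.mp h)

theorem lowerChar_toNat (c : Char) :
    (PySem.Chars.lowerChar c).toNat = if 65 ≤ c.toNat ∧ c.toNat ≤ 90 then c.toNat + 32 else c.toNat := by
  have hA : ('A' : Char) ≤ c ↔ 65 ≤ c.toNat := by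
    rw [Char.le_def, UInt32.le_iff_toNat_le]; exact Iff.rfl
  have hZ : c ≤ ('Z' : Char) ↔ c.toNat ≤ 90 := by
    rw [Char.le_def, UInt32.le_iff_toNat_le]; exact Iff.rfl
  simp only [PySem.Chars.lowerChar, PySem.Chars.isupper, Bool.and_eq_true, decide_eq_true_eq, hA, hZ]
  split_ifs with h1
  · have hv : (c.toNat + 32).isValidChar := Or.inl (by omega)
    rw [Char.toNat_ofNat, if_pos hv]
  · rfl

theorem lowerChar_of_digit {c : Char} (h : PySem.Chars.isdigit c = true) :
    PySem.Chars.lowerChar c = c := by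
  rw [isdigit_iff_toNat] at h
  rw [char_eq_iff_toNat, lowerChar_toNat, if_neg (by omega)]

theorem lower_cons (c : Char) (xs : List Char) :
    PySem.Chars.lower (c :: xs) = PySem.Chars.lowerChar c :: PySem.Chars.lower xs := rfl

theorem step_on (st : Bool × Int × List Int) (tok : List Char)
    (h : PySem.Chars.lower tok = ['o', 'n']) :
    somadorStep st tok = (true, st.2.1, st.2.2) := by
  simp [somadorStep, h]

theorem step_off (st : Bool × Int × List Int) (tok : List Char)
    (h : PySem.Chars.lower tok = ['o', 'f', 'f']) :
    somadorStep st tok = (false, st.2.1, st.2.2) := by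
  simp [somadorStep, h]

theorem step_eq (st : Bool × Int × List Int) :
    somadorStep st ['='] = (st.1, st.2.1, st.2.2 ++ [st.2.1]) := by
  simp [somadorStep, PySem.Chars.lower, PySem.Chars.lowerChar, PySem.Chars.isupper]

theorem step_digits (st : Bool × Int × List Int) (c : Char) (tl : List Char)
    (hc : PySem.Chars.isdigit c = true)
    (hall : ∀ x ∈ c :: tl, PySem.Chars.isdigit x = true) :
    somadorStep st (c :: tl) =
      if st.1 then (st.1, st.2.1 + pyInt (c :: tl), st.2.2) else st := by
  have hlow : PySem.Chars.lower (c :: tl) = c :: tl := by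
    simp only [PySem.Chars.lower]
    exact (List.map_congr_left fun x hx => lowerChar_of_digit (hall x hx)).trans (List.map_id _)
  have h1 : c :: tl ≠ ['o', 'n'] := by
    intro e
    have : c = 'o' := (List.cons.injEq _ _ _ _ ▸ e :
      c = 'o' ∧ tl = ['n']).1
    rw [this] at hc; exact absurd hc (by decide)
  have h2 : c :: tl ≠ ['o', 'f', 'f'] := by
    intro e
    have : c = 'o' := (List.cons.injEq _ _ _ _ ▸ e :
      c = 'o' ∧ tl = ['f', 'f']).1
    rw [this] at hc; exact absurd hc (by decide)
  have h3 : c :: tl ≠ ['='] := by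
    intro e
    have : c = '=' := (List.cons.injEq _ _ _ _ ▸ e :
      c = '=' ∧ tl = []).1
    rw [this] at hc; exact absurd hc (by decide)
  have hsd : PySem.Chars.strIsdigit (c :: tl) = true := by
    simp only [PySem.Chars.strIsdigit, List.isEmpty_cons, Bool.not_false, List.all_cons,
      Bool.true_and, Bool.and_eq_true, List.all_eq_true]
    exact ⟨hc, fun x hx => hall x (List.mem_cons_of_mem _ hx)⟩
  simp only [somadorStep, hlow, if_neg h1, if_neg h2, if_neg h3, hsd, Bool.true_and]

theorem step_other (st : Bool × Int × List Int) (c : Char)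
    (hd : PySem.Chars.isdigit c = false) (he : c ≠ '=') :
    somadorStep st [c] = st := by
  have hlow : PySem.Chars.lower [c] = [PySem.Chars.lowerChar c] := rfl
  have h61 : ('=' : Char).toNat = 61 := rfl
  have he' : c.toNat ≠ 61 := fun x => he ((char_eq_iff_toNat c '=').mpr (by rw [h61]; exact x))
  have h3 : PySem.Chars.lowerChar c ≠ '=' := by
    intro e
    rw [char_eq_iff_toNat, lowerChar_toNat, h61] at e
    split_ifs at e <;> omega
  have h4 : PySem.Chars.isdigit (PySem.Chars.lowerChar c) = false := by
    rw [← Bool.not_eq_true, isdigit_iff_toNat, lowerChar_toNat]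
    have : ¬ (48 ≤ c.toNat ∧ c.toNat ≤ 57) := by
      rw [← isdigit_iff_toNat, hd]; simp
    split_ifs <;> omega
  simp [somadorStep, hlow, h3, h4, PySem.Chars.strIsdigit]

theorem skip_digits (cs : List Char) (som : Int) (res : List Int) :
    somadorGo cs false som res = somadorGo (cs.dropWhile PySem.Chars.isdigit) false som res := by
  induction cs generalizing som res with
  | nil => rfl
  | cons c tl ih =>
    by_cases hd : PySem.Chars.isdigit c
    · rw [List.dropWhile_cons_of_pos hd]
      have htk2 : (c :: tl).take 2 = c :: tl.take 1 := rfl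
      have htk3 : (c :: tl).take 3 = c :: tl.take 2 := rfl
      have hn1 : ¬ PySem.Chars.lower ((c :: tl).take 2) = ['o', 'n'] := by
        rw [htk2, lower_cons, lowerChar_of_digit hd]
        intro e
        have : c = 'o' := (List.cons.injEq _ _ _ _ ▸ e).1
        rw [this] at hd; exact absurd hd (by decide)
      have hn2 : ¬ PySem.Chars.lower ((c :: tl).take 3) = ['o', 'f', 'f'] := by
        rw [htk3, lower_cons, lowerChar_of_digit hd]
        intro e
        have : c = 'o' := (List.cons.injEq _ _ _ _ ▸ e).1
        rw [this] at hd; exact absurd hd (by decide)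
      have hn3 : c ≠ '=' := by
        intro e; rw [e] at hd; exact absurd hd (by decide)
      simp only [somadorGo, if_neg hn1, if_neg hn2, if_neg hn3, Bool.and_false,
        Bool.false_eq_true, if_false]
      exact ih som res
    · rw [List.dropWhile_cons_of_neg hd]

theorem go_tokens (n : Nat) (cs : List Char) (hlen : cs.length ≤ n)
    (on_ : Bool) (som : Int) (res : List Int) :
    somadorGo cs on_ som res = ((somadorTokens cs).foldl somadorStep (on_, som, res)).2.2 := by
  induction n generalizing cs on_ som res with
  | zero =>
    have : cs = [] := List.length_eq_zero_iff.mp (Nat.le_zero.mp hlen)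
    subst this; simp only [somadorGo, somadorTokens, List.foldl_nil]
  | succ n ih =>
    match cs with
    | [] => simp only [somadorGo, somadorTokens, List.foldl_nil]
    | c :: tl =>
      have hlen' : tl.length ≤ n := by simp at hlen; omega
      by_cases h1 : PySem.Chars.lower ((c :: tl).take 2) = ['o', 'n']
      · simp only [somadorGo, somadorTokens, if_pos h1, List.foldl_cons, step_on _ _ h1]
        exact ih _ (by simp only [List.length_drop, List.length_cons]; omega) _ _ _
      · by_cases h2 : PySem.Chars.lower ((c :: tl).take 3) = ['o', 'f', 'f']
        · simp only [somadorGo, somadorTokens, if_neg h1, if_pos h2, List.foldl_cons,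
            step_off _ _ h2]
          exact ih _ (by simp only [List.length_drop, List.length_cons]; omega) _ _ _
        · by_cases h3 : c = '='
          · simp only [somadorGo, somadorTokens, if_neg h1, if_neg h2, if_pos h3,
              List.foldl_cons, step_eq]
            exact ih _ hlen' _ _ _
          · by_cases h4 : PySem.Chars.isdigit c
            · have htw : (c :: tl).takeWhile PySem.Chars.isdigit
                  = c :: tl.takeWhile PySem.Chars.isdigit := List.takeWhile_cons_of_pos h4
              have hdw : (c :: tl).dropWhile PySem.Chars.isdigit
                  = tl.dropWhile PySem.Chars.isdigit := List.dropWhile_cons_of_pos h4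
              have hall : ∀ x ∈ (c :: tl).takeWhile PySem.Chars.isdigit,
                  PySem.Chars.isdigit x = true := fun x hx => List.mem_takeWhile_imp hx
              rw [htw] at hall
              have hstep := step_digits (on_, som, res) c (tl.takeWhile PySem.Chars.isdigit) h4 hall
              have hdwlen : (tl.dropWhile PySem.Chars.isdigit).length ≤ n :=
                le_trans (List.length_dropWhile_le _ _) hlen'
              cases on_ with
              | true =>
                simp only [somadorGo, somadorTokens, if_neg h1, if_neg h2, if_neg h3,
                  Bool.and_true, if_pos h4, List.foldl_cons, htw, hdw, hstep, if_pos]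
                exact ih _ hdwlen _ _ _
              | false =>
                simp only [somadorGo, somadorTokens, if_neg h1, if_neg h2, if_neg h3,
                  Bool.and_false, Bool.false_eq_true, if_false, if_pos h4,
                  List.foldl_cons, htw, hdw, hstep]
                rw [skip_digits tl som res]
                exact ih _ hdwlen _ _ _
            · have h4' : PySem.Chars.isdigit c = false := by simpa using h4
              simp only [somadorGo, somadorTokens, if_neg h1, if_neg h2, if_neg h3,
                h4', Bool.false_and, Bool.false_eq_true, if_false,
                List.foldl_cons, step_other _ _ h4' h3]
              exact ih _ hlen' _ _ _

-- ===== VERDICT (by name: the statement is the Claim_ definition above) =====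
theorem somador_spec : Claim_equal_somador := by
  intro imput _
  unfold Spec_somador somador somador_alt
  exact go_tokens imput.toList.length imput.toList le_rfl true 0 []
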